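-- pv_equiv track=rewrite | github.com/mortyc126-debug/SHA | dimension/carry_inner_physics.py | get_carry_chain
-- ===== SOURCE A (Python) =====
-- def get_carry_chain(x, y):
--     """Возвращает полную carry-цепочку сложения x + y."""
--     c = 0
--     carries = []
--     for i in range(32):
--         xi = (x >> i) & 1
--         yi = (y >> i) & 1
--         s = xi + yi + c
--         c = s >> 1
--         carries.append(c)
--     return carries  # carries[i] = carry OUT of position i
-- ===== SOURCE B (Python) =====
-- def get_carry_chain(x, y):
--     """Возвращает полную carry-цепочку сложения x + y."""
--     s = x + y
--     return [(s >> k) - (x >> k) - (y >> k) for k in range(1, 33)]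
-- ===== Notes on version B (the rewrite author's own statement) =====
-- stated objective: simpler
-- what changed: Replaces the sequential 32-step carry accumulator (per-bit extraction, sum, shift) with a closed form reading carry-out of bit i directly as ((x+y)>>k)-(x>>k)-(y>>k) for k=i+1, with no loop-carried state.
import Mathlib
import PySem

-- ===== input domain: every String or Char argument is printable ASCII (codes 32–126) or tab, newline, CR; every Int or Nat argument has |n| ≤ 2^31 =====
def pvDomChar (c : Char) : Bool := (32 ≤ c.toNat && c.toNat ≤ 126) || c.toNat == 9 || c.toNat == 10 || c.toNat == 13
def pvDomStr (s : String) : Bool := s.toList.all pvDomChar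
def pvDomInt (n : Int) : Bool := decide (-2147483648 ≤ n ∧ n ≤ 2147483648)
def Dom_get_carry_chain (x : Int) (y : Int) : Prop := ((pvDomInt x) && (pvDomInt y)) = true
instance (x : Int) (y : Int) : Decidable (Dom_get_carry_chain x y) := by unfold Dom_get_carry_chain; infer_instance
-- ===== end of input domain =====

-- B replaces A's sequential carry accumulator with a stateless per-bit closed form
-- (carry into position k is (x+y)>>k - (x>>k) - (y>>k)); objective: simpler.

-- ===== PORT A =====
-- one iteration of A's loop body; state = (c, carries); the shift amount i is a
-- range(32) element, so 0 ≤ i and i.toNat is exact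
def pvStepA (x : Int) (y : Int) (st : Int × List Int) (i : Int) : Int × List Int :=
  let xi := PySem.Int.band (x >>> i.toNat) 1
  let yi := PySem.Int.band (y >>> i.toNat) 1
  let s := xi + yi + st.1
  let c := s >>> (1 : Nat)
  (c, st.2 ++ [c])

def get_carry_chain (x : Int) (y : Int) : List Int :=
  ((PySem.List.pyRange 0 32 1).foldl (pvStepA x y) (0, [])).2

-- ===== PORT B =====
def get_carry_chain_alt (x : Int) (y : Int) : List Int :=
  let s := x + y
  (PySem.List.pyRange 1 33 1).map (fun k => (s >>> k.toNat) - (x >>> k.toNat) - (y >>> k.toNat))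

-- ===== PRECONDITION & SPEC =====
def Spec_get_carry_chain (x : Int) (y : Int) (out : List Int) : Prop := out = get_carry_chain_alt x y
instance (x : Int) (y : Int) (out : List Int) : Decidable (Spec_get_carry_chain x y out) := by unfold Spec_get_carry_chain; infer_instance

-- ===== CLAIM (what is proved, stated in full; the proofs are below) =====
def Claim_equal_get_carry_chain : Prop := ∀ (x : Int) (y : Int), Dom_get_carry_chain x y → Spec_get_carry_chain x y (get_carry_chain x y)

-- ===== LEMMAS AND PROOFS =====

-- the carry A maintains after n iterations, in closed form
def pvCarry (x y : Int) (n : Nat) : Int := ((x + y) >>> n) - (x >>> n) - (y >>> n)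

theorem pvCarry_zero (x y : Int) : pvCarry x y 0 = 0 := by
  simp [pvCarry]

-- one step of A's recurrence advances the closed-form carry
theorem pvCarry_step (x y : Int) (n : Nat) :
    (PySem.Int.band (x >>> n) 1 + PySem.Int.band (y >>> n) 1 + pvCarry x y n) >>> (1 : Nat)
      = pvCarry x y (n + 1) := by
  have h2 : (0:Int) < 2 := by norm_num
  simp only [pvCarry, PySem.Int.band_one, PySem.Int.mod_eq_emod_of_pos h2,
    Int.shiftRight_eq_div_pow]
  have hx : x / (2 ^ (n+1) : Nat) = x / (2 ^ n : Nat) / 2 := by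
    rw [pow_succ]; push_cast; rw [Int.ediv_ediv_of_nonneg (by positivity)]
  have hy : y / (2 ^ (n+1) : Nat) = y / (2 ^ n : Nat) / 2 := by
    rw [pow_succ]; push_cast; rw [Int.ediv_ediv_of_nonneg (by positivity)]
  have hs : (x + y) / (2 ^ (n+1) : Nat) = (x + y) / (2 ^ n : Nat) / 2 := by
    rw [pow_succ]; push_cast; rw [Int.ediv_ediv_of_nonneg (by positivity)]
  rw [hx, hy, hs]
  generalize x / (2 ^ n : Nat) = X
  generalize y / (2 ^ n : Nat) = Y
  generalize (x + y) / (2 ^ n : Nat) = S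
  omega

-- invariant of A's fold: after n iterations the state is the closed-form carry
-- together with the first n closed-form outputs
theorem pvLoopA (x y : Int) (n : Nat) :
    ((List.range n).map Int.ofNat).foldl (pvStepA x y) (0, []) =
      (pvCarry x y n, (List.range n).map (fun k => pvCarry x y (k + 1))) := by
  induction n with
  | zero => simp [pvCarry_zero]
  | succ n ih =>
      have hn : (Int.ofNat n).toNat = n := rfl
      rw [List.range_succ, List.map_append, List.foldl_append, ih, List.map_append]
      simp only [List.map_cons, List.map_nil, List.foldl_cons, List.foldl_nil, pvStepA, hn]
      rw [pvCarry_step]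

theorem pyRangeA : PySem.List.pyRange 0 32 1 = (List.range 32).map Int.ofNat := by
  decide

theorem pyRangeB :
    PySem.List.pyRange 1 33 1 = (List.range 32).map (fun k => Int.ofNat k + 1) := by
  decide

-- ===== VERDICT (by name: the statement is the Claim_ definition above) =====
theorem get_carry_chain_spec : Claim_equal_get_carry_chain := by
  intro x y _
  unfold Spec_get_carry_chain get_carry_chain get_carry_chain_alt
  rw [pyRangeA, pyRangeB, pvLoopA, List.map_map]
  dsimp only
  apply List.map_congr_left
  intro k _
  have h1 : (Int.ofNat k + 1).toNat = k + 1 := rfl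
  simp only [Function.comp, h1, pvCarry, Int.shiftRight_natCast_right]
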